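-- pv_equiv track=rewrite | github.com/phuctran2703/chess-game | src/core/Board/magic.py | create_rook_mask
-- ===== SOURCE A (Python) =====
-- def create_rook_mask(square):
--     """Create a mask for rook movement (excludes edges)"""
--     mask = 0
--     rank, file = square // 8, square % 8
--
--     # Horizontal mask (exclude edges)
--     for f in range(file + 1, 7):
--         mask |= (1 << (rank * 8 + f))
--     for f in range(file - 1, 0, -1):
--         mask |= (1 << (rank * 8 + f))
--
--     # Vertical mask (exclude edges)
--     for r in range(rank + 1, 7):
--         mask |= (1 << (r * 8 + file))
--     for r in range(rank - 1, 0, -1):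
--         mask |= (1 << (r * 8 + file))
--
--     return mask
-- ===== SOURCE B (Python) =====
-- def _col_bits(lo, hi):
--     # one bit per byte: sum of 2**(8*r) for r in lo..hi, as a geometric series
--     return ((1 << (8 * (hi + 1))) - (1 << (8 * lo))) // 255 if hi >= lo else 0
--
-- def create_rook_mask(square):
--     """Create a mask for rook movement (excludes edges)"""
--     rank, file = divmod(square, 8)
--     row = 0x7E & ~(1 << file)                 # inner bits of the rank, own file cleared
--     col_inner = _col_bits(rank + 1, 6) + _col_bits(1, rank - 1)  # inner bits of the file
--     return (row << (rank * 8)) + (col_inner << file)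
-- ===== Notes on version B (the rewrite author's own statement) =====
-- stated objective: faster
-- what changed: Replaces the four bit-by-bit loops with a closed-form bitboard expression: an 8-bit inner-row constant (0x7E with the square's file cleared) shifted to the rank, plus geometric-series column masks ((2^(8(hi+1))-2^(8 lo))//255) for the inner file bits.
import Mathlib
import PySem

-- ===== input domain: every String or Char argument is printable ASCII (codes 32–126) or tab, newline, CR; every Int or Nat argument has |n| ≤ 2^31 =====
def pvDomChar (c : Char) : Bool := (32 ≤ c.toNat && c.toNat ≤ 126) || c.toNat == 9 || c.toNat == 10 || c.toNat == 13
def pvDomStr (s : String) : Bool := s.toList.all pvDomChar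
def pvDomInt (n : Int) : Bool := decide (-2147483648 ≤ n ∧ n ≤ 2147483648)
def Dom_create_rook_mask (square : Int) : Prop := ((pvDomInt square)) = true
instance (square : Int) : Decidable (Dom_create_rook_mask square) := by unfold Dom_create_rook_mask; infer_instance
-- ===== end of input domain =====

-- B replaces A's four bit-setting loops by a closed-form bitboard expression (inner-row constant + geometric-series column masks); measurably faster on large squares.


-- ===== PORT A =====
def create_rook_mask (square : Int) : Int :=
  -- rank, file = square // 8, square % 8
  let rank := PySem.Int.floordiv square 8
  let file := PySem.Int.mod square 8
  let mask : Int := 0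
  -- for f in range(file + 1, 7): mask |= (1 << (rank * 8 + f))
  -- (Python raises ValueError on a negative shift count; such inputs are outside Pre_,
  --  so the .toNat on the shift amount is never reached with a negative argument)
  let mask := (PySem.List.pyRange (file + 1) 7 1).foldl
    (fun m f => PySem.Int.bor m ((1 : Int) <<< (rank * 8 + f).toNat)) mask
  -- for f in range(file - 1, 0, -1): mask |= (1 << (rank * 8 + f))
  let mask := (PySem.List.pyRange (file - 1) 0 (-1)).foldl
    (fun m f => PySem.Int.bor m ((1 : Int) <<< (rank * 8 + f).toNat)) mask
  -- for r in range(rank + 1, 7): mask |= (1 << (r * 8 + file))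
  let mask := (PySem.List.pyRange (rank + 1) 7 1).foldl
    (fun m r => PySem.Int.bor m ((1 : Int) <<< (r * 8 + file).toNat)) mask
  -- for r in range(rank - 1, 0, -1): mask |= (1 << (r * 8 + file))
  let mask := (PySem.List.pyRange (rank - 1) 0 (-1)).foldl
    (fun m r => PySem.Int.bor m ((1 : Int) <<< (r * 8 + file).toNat)) mask
  mask

-- ===== PORT B =====
-- _col_bits(lo, hi) = ((1 << (8*(hi+1))) - (1 << (8*lo))) // 255 if hi >= lo else 0
def pvColBits (lo hi : Int) : Int :=
  if hi ≥ lo then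
    PySem.Int.floordiv (((1 : Int) <<< (8 * (hi + 1)).toNat) - ((1 : Int) <<< (8 * lo).toNat)) 255
  else 0

def create_rook_mask_alt (square : Int) : Int :=
  let rank := PySem.Int.floordiv square 8
  let file := PySem.Int.mod square 8
  -- row = 0x7E & ~(1 << file)
  let row := PySem.Int.band 0x7E (Int.not ((1 : Int) <<< file.toNat))
  -- col_inner = _col_bits(rank + 1, 6) + _col_bits(1, rank - 1)
  let colInner := pvColBits (rank + 1) 6 + pvColBits 1 (rank - 1)
  (row <<< (rank * 8).toNat) + (colInner <<< file.toNat)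

-- ===== PRECONDITION & SPEC =====
-- Pre_ excludes square < 0, where Python A raises ValueError (negative shift count in 1 << (rank*8+f)).
def Pre_create_rook_mask (square : Int) : Prop := 0 ≤ square
instance (square : Int) : Decidable (Pre_create_rook_mask square) := by unfold Pre_create_rook_mask; infer_instance
def pvWitness_create_rook_mask : Int := 35

def Spec_create_rook_mask (square : Int) (out : Int) : Prop := out = create_rook_mask_alt square
instance (square : Int) (out : Int) : Decidable (Spec_create_rook_mask square out) := by unfold Spec_create_rook_mask; infer_instance

-- ===== CLAIM (what is proved, stated in full; the proofs are below) =====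
def Claim_equal_create_rook_mask : Prop := ∀ (square : Int), Dom_create_rook_mask square → Pre_create_rook_mask square → Spec_create_rook_mask square (create_rook_mask square)

-- ===== LEMMAS AND PROOFS =====

-- list(range(a, 0, -1)) = [a, a-1, ..., 1]
theorem pvRangeDown (a : ℤ) : PySem.List.pyRange a 0 (-1) = (List.range a.toNat).map (fun k : ℕ => a - (k:ℤ)) := by
  by_cases h : 0 < a
  · have h1 : PySem.List.pyRange a 0 (-1)
        = List.map (fun k : ℕ => a + (-1)*(k:ℤ)) (List.range ((a - 0 + -(-1) - 1) / -(-1)).toNat) := by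
      unfold PySem.List.pyRange
      rw [if_neg (by decide), if_neg (by decide), if_pos h]
    have hc : (a - 0 + -(-1) - 1) / -(-1) = a := by norm_num
    rw [h1, hc]
    exact List.map_congr_left (fun k _ => by ring)
  · have h1 : PySem.List.pyRange a 0 (-1)
        = List.map (fun k : ℕ => a + (-1)*(k:ℤ)) (List.range (0:ℕ)) := by
      unfold PySem.List.pyRange
      rw [if_neg (by decide), if_neg (by decide), if_neg h]
    rw [h1]
    simp [show a.toNat = 0 by omega]

-- OR-ing in a bit strictly below all bits of M is addition
theorem pv_or_add : ∀ (s M b : ℕ), 2^s ∣ M → b < 2^s → M ||| b = M + b := by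
  intro s
  induction s with
  | zero =>
    intro M b _ hb
    have hb0 : b = 0 := by omega
    subst hb0
    simp
  | succ s ih =>
    intro M b hM hb
    obtain ⟨c, rfl⟩ := hM
    have hMbit : 2^(s+1)*c = Nat.bit false (2^s*c) := by simp [Nat.bit_val]; ring
    rw [hMbit, ← Nat.bit_testBit_zero_shiftRight_one b, Nat.lor_bit]
    have h2 : b >>> 1 = b / 2 := Nat.shiftRight_one b
    have ihb : (2^s*c) ||| (b >>> 1) = 2^s*c + b >>> 1 := ih _ _ ⟨c, rfl⟩ (by rw [h2]; omega)
    rw [ihb]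
    simp only [Nat.bit_val, Bool.false_or, h2, Nat.testBit_zero]
    have hb2 := Nat.mod_two_eq_zero_or_one b
    rcases hb2 with h | h <;> simp [h] <;> omega

-- an Int fold of `mask |= 1 << e(x)` is the cast of the corresponding Nat fold
theorem pv_foldl_bor_cast {α : Type} (g : α → ℕ) : ∀ (l : List α) (M : ℕ),
    List.foldl (fun m x => PySem.Int.bor m ((1 : ℤ) <<< g x)) (↑M) l
      = ↑(List.foldl (fun m x => m ||| 2 ^ g x) M l) := by
  intro l
  induction l with
  | nil => intro M; rfl
  | cons x xs ih =>
    intro M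
    simp only [List.foldl_cons]
    rw [show ((1:ℤ) <<< g x) = ((2 ^ g x : ℕ) : ℤ) by rw [Int.shiftLeft_eq]; push_cast; ring,
        PySem.Int.bor_natCast]
    exact ih _

-- a fold OR-ing bits 2^(s + e k) from M <<< s is the small fold, shifted
theorem pv_fold_shift (s : ℕ) (e : ℕ → ℕ) : ∀ (l : List ℕ) (M : ℕ),
    List.foldl (fun m k => m ||| 2^(s + e k)) (M <<< s) l
      = (List.foldl (fun m k => m ||| 2^(e k)) M l) <<< s := by
  intro l
  induction l with
  | nil => intro M; rfl
  | cons x xs ih =>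
    intro M
    simp only [List.foldl_cons]
    rw [show (2:ℕ)^(s + e x) = 2^(e x) <<< s by rw [Nat.shiftLeft_eq]; rw [pow_add]; ring,
        ← Nat.shiftLeft_or_distrib]
    exact ih _

-- sum of the column bits 2^(8*1) + ... + 2^(8*m)
def pvColSum : ℕ → ℕ
  | 0 => 0
  | (m+1) => 2^(8*(m+1)) + pvColSum m

theorem pvColSum_geom (m : ℕ) : 255 * pvColSum m + 256 = 2^(8*(m+1)) := by
  induction m with
  | zero => decide
  | succ m ih =>
    have h8 : 8*(m+1+1) = 8*(m+1) + 8 := by ring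
    calc 255 * pvColSum (m+1) + 256
        = 255*2^(8*(m+1)) + (255 * pvColSum m + 256) := by simp [pvColSum]; ring
      _ = 255*2^(8*(m+1)) + 2^(8*(m+1)) := by rw [ih]
      _ = 2^(8*(m+1)) * 2^8 := by norm_num; ring
      _ = 2^(8*(m+1+1)) := by rw [h8, pow_add]

-- A's last loop: OR-ing the column bits below the rank, rows m, m-1, ..., 1
theorem pv_vert_fold (f : ℕ) (hf : f < 8) : ∀ (m M : ℕ), 2^(8*m+8) ∣ M →
    List.foldl (fun acc k => acc ||| 2^(8*(m-k)+f)) M (List.range m) = M + pvColSum m * 2^f := by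
  intro m
  induction m with
  | zero => intro M _; simp [pvColSum]
  | succ m ih =>
    intro M hM
    rw [List.range_succ_eq_map]
    simp only [List.foldl_cons, List.foldl_map]
    have hstep : M ||| 2^(8*(m+1-0)+f) = M + 2^(8*(m+1)+f) := by
      have := pv_or_add (8*(m+1)+8) M (2^(8*(m+1)+f))
        (by simpa using hM) (by apply Nat.pow_lt_pow_right (by norm_num); omega)
      simpa using this
    rw [hstep]
    have hfun : (fun (acc k : ℕ) => acc ||| 2^(8*(m+1-Nat.succ k)+f))
        = (fun (acc k : ℕ) => acc ||| 2^(8*(m-k)+f)) := by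
      funext acc k
      congr 2
      omega
    rw [hfun, ih (M + 2^(8*(m+1)+f)) (by
      have h1 : (2:ℕ)^(8*m+8) ∣ M := dvd_trans (pow_dvd_pow 2 (by omega)) hM
      have h2 : (2:ℕ)^(8*m+8) ∣ 2^(8*(m+1)+f) := pow_dvd_pow 2 (by omega)
      exact dvd_add h1 h2)]
    have : 2^(8*(m+1)+f) = 2^(8*(m+1)) * 2^f := by rw [pow_add]
    simp [pvColSum, this]
    ring

-- the Int fold with start 0, bridged to Nat
theorem pv_foldl_bor_cast0 {α : Type} (g : α → ℕ) (l : List α) :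
    List.foldl (fun m x => PySem.Int.bor m ((1 : ℤ) <<< g x)) (0:ℤ) l
      = ((List.foldl (fun m x => m ||| 2 ^ g x) 0 l : ℕ) : ℤ) := by
  rw [show (0:ℤ) = ((0:ℕ):ℤ) by norm_num]
  exact pv_foldl_bor_cast g l 0

-- the inner-row constant: B's 0x7E & ~(1 << f) equals A's accumulated horizontal bits
def pvRow1 (f : ℕ) : ℕ := List.foldl (fun m k => m ||| 2^(f+1+k)) 0 (List.range (6-f))
def pvRowNat (f : ℕ) : ℕ := List.foldl (fun m k => m ||| 2^(f-1-k)) (pvRow1 f) (List.range (f-1))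

theorem pvRowNat_eq_band (f : ℕ) (hf : f < 8) :
    ((pvRowNat f : ℕ) : ℤ) = PySem.Int.band 126 (Int.not ((1 : ℤ) <<< f)) := by
  interval_cases f <;> decide

-- the main computation for squares off the top of the board-size recursion: rank ≥ 8 handled symbolically
theorem pv_main (r f : ℕ) (hr : 8 ≤ r) (hf : f < 8) :
    create_rook_mask ((8*r+f : ℕ) : ℤ) = create_rook_mask_alt ((8*r+f : ℕ) : ℤ) := by
  have hrank : PySem.Int.floordiv ((8*r+f : ℕ) : ℤ) 8 = (r:ℤ) := by
    have h := PySem.Int.floordiv_natCast (8*r+f) 8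
    rw [show (8*r+f)/8 = r by omega] at h
    exact_mod_cast h
  have hfile : PySem.Int.mod ((8*r+f : ℕ) : ℤ) 8 = (f:ℤ) := by
    have h := PySem.Int.mod_natCast (8*r+f) 8
    rw [show (8*r+f)%8 = f by omega] at h
    exact_mod_cast h
  simp only [create_rook_mask, create_rook_mask_alt, hrank, hfile]
  -- evaluate the four range lists
  have hl1 : PySem.List.pyRange ((f:ℤ)+1) 7 1 = (List.range (6-f)).map (fun k : ℕ => (f:ℤ)+1+(k:ℤ)) := by
    rw [PySem.List.pyRange_one, show ((7:ℤ) - ((f:ℤ)+1)).toNat = 6-f by omega]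
  have hl2 : PySem.List.pyRange ((f:ℤ)-1) 0 (-1) = (List.range (f-1)).map (fun k : ℕ => (f:ℤ)-1-(k:ℤ)) := by
    rw [pvRangeDown, show ((f:ℤ)-1).toNat = f-1 by omega]
  have hl3 : PySem.List.pyRange ((r:ℤ)+1) 7 1 = ([] : List ℤ) := by
    rw [PySem.List.pyRange_one, show ((7:ℤ) - ((r:ℤ)+1)).toNat = 0 by omega]
    simp
  have hl4 : PySem.List.pyRange ((r:ℤ)-1) 0 (-1) = (List.range (r-1)).map (fun k : ℕ => (r:ℤ)-1-(k:ℤ)) := by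
    rw [pvRangeDown, show ((r:ℤ)-1).toNat = r-1 by omega]
  rw [hl1, hl2, hl3, hl4]
  simp only [pv_foldl_bor_cast0, pv_foldl_bor_cast, List.foldl_map, List.foldl_nil]
  -- A's horizontal loops: the small row fold, shifted to the rank offset
  have e1 : List.foldl (fun (m x : ℕ) => m ||| 2 ^ ((r:ℤ) * 8 + ((f:ℤ) + 1 + (x:ℤ))).toNat) 0 (List.range (6-f))
      = (pvRow1 f) <<< (8*r) := by
    have hE : ∀ (m x : ℕ), m ||| 2 ^ ((r:ℤ) * 8 + ((f:ℤ) + 1 + (x:ℤ))).toNat = m ||| 2 ^ (8*r + (f+1+x)) := by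
      intro m x; congr 2; omega
    simp only [hE]
    conv_lhs => rw [show (0:ℕ) = 0 <<< (8*r) by simp]
    exact pv_fold_shift (8*r) (fun x => f+1+x) _ 0
  have e2 : List.foldl (fun (m x : ℕ) => m ||| 2 ^ ((r:ℤ) * 8 + ((f:ℤ) - 1 - (x:ℤ))).toNat) ((pvRow1 f) <<< (8*r)) (List.range (f-1))
      = (pvRowNat f) <<< (8*r) := by
    rw [PySem.List.foldl_congr_mem _ _ (fun (m x : ℕ) => m ||| 2 ^ (8*r + (f-1-x))) _ (by
      intro acc x hx
      rw [List.mem_range] at hx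
      congr 2
      omega)]
    rw [pvRowNat]
    exact pv_fold_shift (8*r) (fun x => f-1-x) _ (pvRow1 f)
  have e4 : List.foldl (fun (m x : ℕ) => m ||| 2 ^ (((r:ℤ) - 1 - (x:ℤ)) * 8 + (f:ℤ)).toNat) ((pvRowNat f) <<< (8*r)) (List.range (r-1))
      = (pvRowNat f) <<< (8*r) + pvColSum (r-1) * 2^f := by
    rw [PySem.List.foldl_congr_mem _ _ (fun (m x : ℕ) => m ||| 2 ^ (8*((r-1)-x)+f)) _ (by
      intro acc x hx
      rw [List.mem_range] at hx
      congr 2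
      omega)]
    apply pv_vert_fold f hf (r-1)
    rw [Nat.shiftLeft_eq, show 8*(r-1)+8 = 8*r by omega]
    exact dvd_mul_left _ _
  rw [e1, e2, e4]
  -- B's column pieces
  have hb3 : pvColBits ((r:ℤ)+1) 6 = 0 := by
    unfold pvColBits
    rw [if_neg (by omega)]
  have hb4 : pvColBits 1 ((r:ℤ)-1) = ((pvColSum (r-1) : ℕ) : ℤ) := by
    unfold pvColBits
    rw [if_pos (by omega), show ((8:ℤ) * ((r:ℤ)-1+1)).toNat = 8*r by omega,
        show ((8:ℤ) * (1:ℤ)).toNat = 8 by decide, Int.shiftLeft_eq, Int.shiftLeft_eq, one_mul, one_mul]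
    have hg := pvColSum_geom (r-1)
    rw [show 8*(r-1+1) = 8*r by omega] at hg
    rw [show ((2:ℤ)^(8*r)) = ((255 * pvColSum (r-1) + 256 : ℕ) : ℤ) by rw [hg]; push_cast; ring]
    rw [PySem.Int.floordiv_eq_ediv_of_pos (by norm_num)]
    rw [show ((255 * pvColSum (r-1) + 256 : ℕ) : ℤ) - 2^8 = 255 * ((pvColSum (r-1) : ℕ) : ℤ) by push_cast; ring]
    exact Int.mul_ediv_cancel_left _ (by norm_num)
  rw [hb3, hb4]
  simp only [Int.toNat_natCast]
  rw [← pvRowNat_eq_band f hf]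
  rw [show ((r:ℤ) * 8).toNat = 8*r by omega, Int.shiftLeft_eq, Int.shiftLeft_eq]
  push_cast [Nat.shiftLeft_eq]
  ring

theorem pv_small (n : ℕ) (hn : n < 64) :
    create_rook_mask ((n : ℕ) : ℤ) = create_rook_mask_alt ((n : ℕ) : ℤ) := by
  interval_cases n <;> decide

-- ===== VERDICT (by name: the statement is the Claim_ definition above) =====
theorem create_rook_mask_spec : Claim_equal_create_rook_mask := by
  intro square _ hpre
  obtain ⟨n, rfl⟩ := Int.eq_ofNat_of_zero_le hpre
  show create_rook_mask _ = create_rook_mask_alt _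
  by_cases hn : n < 64
  · exact pv_small n hn
  · have h : n = 8 * (n / 8) + n % 8 := by omega
    rw [h]
    exact pv_main (n / 8) (n % 8) (by omega) (by omega)
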